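-- pv_equiv track=rewrite | github.com/mescu74/systematic-review-assistant | src/sr_assistant/app/pages/human_benchmark_page.py | _categorize_exclusion_criteria
-- ===== SOURCE A (Python) =====
-- def _categorize_exclusion_criteria(exclusion_lines: list[str]) -> dict[str, list[str]]:
--     """Categorize exclusion criteria into groups."""
--     categories = {
--         "language_related": [],
--         "study_type_related": [],
--         "publication_related": [],
--         "other_criteria": [],
--     }
--
--     for line in exclusion_lines:
--         line_lower = line.lower()
--         if any(word in line_lower for word in ["language", "english", "non-english"]):
--             categories["language_related"].append(line)
--         elif any(
--             word in line_lower
--             for word in ["study", "design", "case report", "review", "meta-analysis"]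
--         ):
--             categories["study_type_related"].append(line)
--         elif any(
--             word in line_lower
--             for word in ["publication", "published", "peer", "preprint"]
--         ):
--             categories["publication_related"].append(line)
--         else:
--             categories["other_criteria"].append(line)
--
--     return categories
-- ===== SOURCE B (Python) =====
-- _TABLE = [
--     ("language_related", ["language", "english", "non-english"]),
--     ("study_type_related", ["study", "design", "case report", "review", "meta-analysis"]),
--     ("publication_related", ["publication", "published", "peer", "preprint"]),
-- ]
--
--
-- def _category(line):
--     line_lower = line.lower()
--     for cat, words in _TABLE:
--         if any(w in line_lower for w in words):
--             return cat
--     return "other_criteria"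
--
--
-- def _categorize_exclusion_criteria(exclusion_lines):
--     cats = [c for c, _ in _TABLE] + ["other_criteria"]
--     return {c: [line for line in exclusion_lines if _category(line) == c] for c in cats}
-- ===== Notes on version B (the rewrite author's own statement) =====
-- stated objective: idiomatic
-- what changed: B replaces A's one-pass elif chain over a mutable dict with a data-driven (category, keywords) table and a _category classifier, building each bucket as a filter of the input per category.
import Mathlib
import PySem

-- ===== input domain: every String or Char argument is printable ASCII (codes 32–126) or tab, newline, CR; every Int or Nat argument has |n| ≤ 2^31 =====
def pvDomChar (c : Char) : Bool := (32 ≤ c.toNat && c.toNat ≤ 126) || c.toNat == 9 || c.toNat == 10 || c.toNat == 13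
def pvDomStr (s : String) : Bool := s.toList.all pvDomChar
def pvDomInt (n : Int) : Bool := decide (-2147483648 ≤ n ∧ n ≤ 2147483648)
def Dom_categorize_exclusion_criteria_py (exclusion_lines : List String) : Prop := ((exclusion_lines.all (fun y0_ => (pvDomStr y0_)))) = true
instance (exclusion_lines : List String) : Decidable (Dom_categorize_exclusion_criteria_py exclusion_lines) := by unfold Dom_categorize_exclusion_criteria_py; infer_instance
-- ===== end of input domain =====

-- B is an idiomatic table-driven rewrite: a (category, keywords) table and a per-line classifier, each bucket built by a filter.

-- ===== PORT A =====
-- state = the four category lists, in A's key order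
def catA_step (s : List String × List String × List String × List String) (line : String) :
    List String × List String × List String × List String :=
  let ll := PySem.Str.lower line
  if ["language", "english", "non-english"].any (fun w => PySem.Str.isIn w ll) then
    (s.1 ++ [line], s.2.1, s.2.2.1, s.2.2.2)
  else if ["study", "design", "case report", "review", "meta-analysis"].any (fun w => PySem.Str.isIn w ll) then
    (s.1, s.2.1 ++ [line], s.2.2.1, s.2.2.2)
  else if ["publication", "published", "peer", "preprint"].any (fun w => PySem.Str.isIn w ll) then
    (s.1, s.2.1, s.2.2.1 ++ [line], s.2.2.2)
  else
    (s.1, s.2.1, s.2.2.1, s.2.2.2 ++ [line])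

def categorize_exclusion_criteria_py (exclusion_lines : List String) : List (String × List String) :=
  let st := exclusion_lines.foldl catA_step ([], [], [], [])
  [("language_related", st.1), ("study_type_related", st.2.1),
   ("publication_related", st.2.2.1), ("other_criteria", st.2.2.2)]

-- ===== PORT B =====
def pvTable : List (String × List String) :=
  [("language_related", ["language", "english", "non-english"]),
   ("study_type_related", ["study", "design", "case report", "review", "meta-analysis"]),
   ("publication_related", ["publication", "published", "peer", "preprint"])]

def pvCategory (line : String) : String :=
  let ll := PySem.Str.lower line
  match pvTable.find? (fun cw => cw.2.any (fun w => PySem.Str.isIn w ll)) with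
  | some cw => cw.1
  | none => "other_criteria"

def categorize_exclusion_criteria_py_alt (exclusion_lines : List String) : List (String × List String) :=
  (pvTable.map Prod.fst ++ ["other_criteria"]).map
    (fun c => (c, exclusion_lines.filter (fun line => pvCategory line == c)))

-- ===== PRECONDITION & SPEC =====
def Spec_categorize_exclusion_criteria_py (exclusion_lines : List String) (out : List (String × List String)) : Prop := out = categorize_exclusion_criteria_py_alt exclusion_lines
instance (exclusion_lines : List String) (out : List (String × List String)) : Decidable (Spec_categorize_exclusion_criteria_py exclusion_lines out) := by unfold Spec_categorize_exclusion_criteria_py; infer_instance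

-- ===== CLAIM (what is proved, stated in full; the proofs are below) =====
def Claim_equal_categorize_exclusion_criteria_py : Prop := ∀ (exclusion_lines : List String), Dom_categorize_exclusion_criteria_py exclusion_lines → Spec_categorize_exclusion_criteria_py exclusion_lines (categorize_exclusion_criteria_py exclusion_lines)

-- ===== LEMMAS AND PROOFS =====
-- the foldl state is exactly the four category filters, appended to the running state
theorem catA_foldl_filter (ls : List String) (a b c d : List String) :
    ls.foldl catA_step (a, b, c, d) =
      (a ++ ls.filter (fun l => pvCategory l == "language_related"),
       b ++ ls.filter (fun l => pvCategory l == "study_type_related"),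
       c ++ ls.filter (fun l => pvCategory l == "publication_related"),
       d ++ ls.filter (fun l => pvCategory l == "other_criteria")) := by
  induction ls generalizing a b c d with
  | nil => simp
  | cons h t ih =>
    rw [List.foldl_cons]
    by_cases hb1 : (["language", "english", "non-english"].any fun w => PySem.Str.isIn w (PySem.Str.lower h)) = true
    · have hc : pvCategory h = "language_related" := by
        unfold pvCategory pvTable; simp only [List.find?, hb1]
      have hstep : catA_step (a, b, c, d) h = (a ++ [h], b, c, d) := by
        unfold catA_step; simp only [hb1, if_true]
      rw [hstep, ih]
      simp [hc]
    · rw [Bool.not_eq_true] at hb1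
      by_cases hb2 : (["study", "design", "case report", "review", "meta-analysis"].any fun w => PySem.Str.isIn w (PySem.Str.lower h)) = true
      · have hc : pvCategory h = "study_type_related" := by
          unfold pvCategory pvTable; simp only [List.find?, hb1, hb2]
        have hstep : catA_step (a, b, c, d) h = (a, b ++ [h], c, d) := by
          unfold catA_step; simp only [hb1, hb2, if_true, Bool.false_eq_true, if_false]
        rw [hstep, ih]
        simp [hc]
      · rw [Bool.not_eq_true] at hb2
        by_cases hb3 : (["publication", "published", "peer", "preprint"].any fun w => PySem.Str.isIn w (PySem.Str.lower h)) = true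
        · have hc : pvCategory h = "publication_related" := by
            unfold pvCategory pvTable; simp only [List.find?, hb1, hb2, hb3]
          have hstep : catA_step (a, b, c, d) h = (a, b, c ++ [h], d) := by
            unfold catA_step; simp only [hb1, hb2, hb3, if_true, Bool.false_eq_true, if_false]
          rw [hstep, ih]
          simp [hc]
        · rw [Bool.not_eq_true] at hb3
          have hc : pvCategory h = "other_criteria" := by
            unfold pvCategory pvTable; simp only [List.find?, hb1, hb2, hb3]
          have hstep : catA_step (a, b, c, d) h = (a, b, c, d ++ [h]) := by
            unfold catA_step; simp only [hb1, hb2, hb3, Bool.false_eq_true, if_false]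
          rw [hstep, ih]
          simp [hc]

theorem categorize_exclusion_criteria_py_spec : Claim_equal_categorize_exclusion_criteria_py := by
  intro ls _
  show _ = _
  simp only [categorize_exclusion_criteria_py, categorize_exclusion_criteria_py_alt,
    catA_foldl_filter, pvTable]
  simp
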